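-- pv_equiv track=rewrite | github.com/RemiErr/2026-python | weeks/week-05/solutions/1111405012/question_10057-su.py | summarize_password_candidates
-- ===== SOURCE A (Python) =====
-- def summarize_password_candidates(numbers: list[int]) -> tuple[int, int, int]:
--     numbers.sort()
--     lower = numbers[(len(numbers) - 1) // 2]
--     upper = numbers[len(numbers) // 2]
--
--     count = 0
--     for value in numbers:
--         if lower <= value <= upper:
--             count += 1
--
--     ways = upper - lower + 1
--     return lower, count, ways
-- ===== SOURCE B (Python) =====
-- def _kth_smallest(xs, k):
--     # quickselect with middle-element pivot: k-th smallest (0-based), no sorting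
--     while True:
--         p = xs[len(xs) // 2]
--         lt = [x for x in xs if x < p]
--         if k < len(lt):
--             xs = lt
--             continue
--         eq = sum(1 for x in xs if x == p)
--         if k < len(lt) + eq:
--             return p
--         k -= len(lt) + eq
--         xs = [x for x in xs if x > p]
--
--
-- def summarize_password_candidates(numbers: list[int]) -> tuple[int, int, int]:
--     n = len(numbers)
--     lower = _kth_smallest(numbers, (n - 1) // 2)
--     upper = _kth_smallest(numbers, n // 2)
--     count = sum(1 for v in numbers if lower <= v <= upper)
--     return lower, count, upper - lower + 1
-- ===== Notes on version B (the rewrite author's own statement) =====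
-- stated objective: alternative
-- what changed: Replaced the full sort by quickselect (middle-element pivot) for the two median order statistics plus a linear count, so the list is never sorted; B also does not mutate the input list (A sorts it in place).
-- outside the precondition, e.g. on summarize_password_candidates([]): A raises IndexError, B raises IndexError
import Mathlib
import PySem

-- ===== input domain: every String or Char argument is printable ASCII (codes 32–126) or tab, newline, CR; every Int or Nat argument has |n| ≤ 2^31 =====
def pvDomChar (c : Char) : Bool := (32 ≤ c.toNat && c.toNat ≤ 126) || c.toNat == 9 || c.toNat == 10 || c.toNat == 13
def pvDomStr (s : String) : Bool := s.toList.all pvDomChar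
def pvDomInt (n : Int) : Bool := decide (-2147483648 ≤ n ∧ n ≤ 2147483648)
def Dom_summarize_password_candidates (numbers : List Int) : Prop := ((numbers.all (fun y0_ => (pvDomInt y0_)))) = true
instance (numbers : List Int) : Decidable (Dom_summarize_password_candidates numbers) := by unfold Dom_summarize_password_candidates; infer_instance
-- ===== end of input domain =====

-- B replaces A's full sort by quickselect for the two medians plus a linear count (a different algorithm, not measured faster);
-- equivalence is about the RETURN value only: A sorts the input list in place, B does not mutate it.


-- ===== PORT A =====
def summarize_password_candidates (numbers : List Int) : Int × Int × Int :=
  -- numbers.sort() (in place); from here on A's `numbers` is the sorted list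
  let s := PySem.List.sorted numbers (fun x => x) false
  let n : Int := s.length
  -- numbers[(len(numbers)-1)//2]; IndexError on [] is excluded by Pre_ (getD 0 is unreachable there)
  let lower := (PySem.List.pyGet? s (PySem.Int.floordiv (n - 1) 2)).getD 0
  let upper := (PySem.List.pyGet? s (PySem.Int.floordiv n 2)).getD 0
  let count : Int := s.foldl (fun c v => if lower ≤ v ∧ v ≤ upper then c + 1 else c) 0
  (lower, count, upper - lower + 1)

-- ===== PORT B =====
-- _kth_smallest: quickselect with middle-element pivot (Source B's while-loop as recursion;
-- the fuel argument, initially xs.length, only makes termination structural: each recursive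
-- call strictly shrinks the list, exactly as in Source B)
def pvKthGo : Nat → List Int → Nat → Int
  | 0, _, _ => 0
  | _, [], _ => 0  -- unreachable under Pre_ (Source B would raise here)
  | fuel + 1, a :: t, k =>
    let xs := a :: t
    let p := xs.getD (xs.length / 2) 0
    let lt := xs.filter (fun x => decide (x < p))
    if k < lt.length then pvKthGo fuel lt k
    else
      let eq := (xs.filter (fun x => decide (x = p))).length
      if k < lt.length + eq then p
      else pvKthGo fuel (xs.filter (fun x => decide (p < x))) (k - (lt.length + eq))

def pvKth (xs : List Int) (k : Nat) : Int := pvKthGo xs.length xs k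

def summarize_password_candidates_alt (numbers : List Int) : Int × Int × Int :=
  let n := numbers.length
  let lower := pvKth numbers ((n - 1) / 2)
  let upper := pvKth numbers (n / 2)
  let count : Int := numbers.foldl (fun c v => c + (if lower ≤ v ∧ v ≤ upper then 1 else 0)) 0
  (lower, count, upper - lower + 1)

-- ===== PRECONDITION & SPEC =====
-- A raises IndexError on the empty list; that input is excluded.
def Pre_summarize_password_candidates (numbers : List Int) : Prop := numbers ≠ []
instance (numbers : List Int) : Decidable (Pre_summarize_password_candidates numbers) := by unfold Pre_summarize_password_candidates; infer_instance
def pvWitness_summarize_password_candidates : List Int := [3, 1, 2, 2]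

def Spec_summarize_password_candidates (numbers : List Int) (out : Int × Int × Int) : Prop := out = summarize_password_candidates_alt numbers
instance (numbers : List Int) (out : Int × Int × Int) : Decidable (Spec_summarize_password_candidates numbers out) := by unfold Spec_summarize_password_candidates; infer_instance

-- ===== CLAIM (what is proved, stated in full; the proofs are below) =====
def Claim_equal_summarize_password_candidates : Prop := ∀ (numbers : List Int), Dom_summarize_password_candidates numbers → Pre_summarize_password_candidates numbers → Spec_summarize_password_candidates numbers (summarize_password_candidates numbers)

-- ===== LEMMAS AND PROOFS =====

-- the three pivot buckets are a permutation of the list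
theorem pvPermFilterThree (p : Int) : ∀ (xs : List Int),
    (xs.filter (fun x => decide (x < p)) ++ xs.filter (fun x => decide (x = p)) ++
      xs.filter (fun x => decide (p < x))).Perm xs := by
  intro xs
  induction xs with
  | nil => simp
  | cons a t ih =>
    rcases lt_trichotomy a p with h | h | h
    · simpa [List.filter_cons, h, h.ne, not_lt.2 h.le] using ih.cons a
    · subst h
      have h1 : (t.filter (fun x => decide (x < a)) ++ (a :: t.filter (fun x => decide (x = a))) ++
          t.filter (fun x => decide (a < x))).Perm
          (a :: (t.filter (fun x => decide (x < a)) ++ t.filter (fun x => decide (x = a)) ++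
            t.filter (fun x => decide (a < x)))) := by
        have := List.perm_middle (a := a) (l₁ := t.filter (fun x => decide (x < a)))
          (l₂ := t.filter (fun x => decide (x = a)) ++ t.filter (fun x => decide (a < x)))
        simpa [List.append_assoc] using this
      simpa [List.filter_cons] using h1.trans (ih.cons a)
    · have h1 : (t.filter (fun x => decide (x < p)) ++ t.filter (fun x => decide (x = p)) ++
          (a :: t.filter (fun x => decide (p < x)))).Perm
          (a :: (t.filter (fun x => decide (x < p)) ++ t.filter (fun x => decide (x = p)) ++
            t.filter (fun x => decide (p < x)))) := by
        have := List.perm_middle (a := a)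
          (l₁ := t.filter (fun x => decide (x < p)) ++ t.filter (fun x => decide (x = p)))
          (l₂ := t.filter (fun x => decide (p < x)))
        simpa [List.append_assoc] using this
      simpa [List.filter_cons, h, h.ne', not_lt.2 h.le] using h1.trans (ih.cons a)

-- sorted xs splits at a pivot into sorted(<p) ++ (=p) ++ sorted(>p)
theorem pvSortedSplit (xs : List Int) (p : Int) :
    PySem.List.sorted xs (fun x => x) false =
      PySem.List.sorted (xs.filter (fun x => decide (x < p))) (fun x => x) false ++
      xs.filter (fun x => decide (x = p)) ++
      PySem.List.sorted (xs.filter (fun x => decide (p < x))) (fun x => x) false := by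
  apply PySem.List.sorted_id_eq_of_perm_of_pairwise
  · exact (((PySem.List.sorted_perm _ _ _).append_right _).append
      (PySem.List.sorted_perm _ _ _)).trans (pvPermFilterThree p xs)
  · rw [List.pairwise_append, List.pairwise_append]
    refine ⟨⟨by simpa using PySem.List.sorted_pairwise (xs.filter (fun x => decide (x < p))) (fun x => x),
      List.pairwise_of_forall_mem_list ?_, ?_⟩,
      by simpa using PySem.List.sorted_pairwise (xs.filter (fun x => decide (p < x))) (fun x => x), ?_⟩
    · intro a ha b hb
      simp only [List.mem_filter, decide_eq_true_eq] at ha hb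
      omega
    · intro a ha b hb
      rw [PySem.List.mem_sorted] at ha
      simp only [List.mem_filter, decide_eq_true_eq] at ha hb
      omega
    · intro a ha b hb
      rw [List.mem_append] at ha
      rw [PySem.List.mem_sorted] at hb
      rcases ha with ha | ha <;>
        [rw [PySem.List.mem_sorted] at ha; skip] <;>
        simp only [List.mem_filter, decide_eq_true_eq] at ha hb <;> omega

theorem pvAllEqGetD (l : List Int) (p : Int) (i : Nat) (hi : i < l.length)
    (h : ∀ x ∈ l, x = p) : l.getD i 0 = p := by
  rw [List.getD_eq_getElem _ _ hi]
  exact h _ (List.getElem_mem _)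

-- quickselect returns the k-th element of the sorted list
theorem pvKthGo_sorted : ∀ (fuel : Nat) (xs : List Int), xs.length ≤ fuel → ∀ (k : Nat), k < xs.length →
    pvKthGo fuel xs k = (PySem.List.sorted xs (fun x => x) false).getD k 0 := by
  intro fuel
  induction fuel with
  | zero => intro xs hf k hk; omega
  | succ fuel ih =>
    intro xs hf k hk
    match xs with
    | [] => simp at hk
    | a :: t =>
      rw [pvKthGo]
      set xs := a :: t with hxs
      set p := xs.getD (xs.length / 2) 0 with hp
      set lt := xs.filter (fun x => decide (x < p)) with hlt
      set eql := xs.filter (fun x => decide (x = p)) with heql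
      set gt := xs.filter (fun x => decide (p < x)) with hgt
      have hsplit := pvSortedSplit xs p
      rw [← hlt, ← heql, ← hgt] at hsplit
      have hlen := (pvPermFilterThree p xs).length_eq
      simp only [List.length_append, ← hlt, ← heql, ← hgt] at hlen
      have hltlen : lt.length < xs.length := by
        refine List.length_filter_lt_length_iff_exists.2 ⟨p, ?_, by simp⟩
        rw [hp, List.getD_eq_getElem _ _ (by simp [hxs]; omega)]
        exact List.getElem_mem _
      have hgtlen : gt.length < xs.length := by
        refine List.length_filter_lt_length_iff_exists.2 ⟨p, ?_, by simp⟩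
        rw [hp, List.getD_eq_getElem _ _ (by simp [hxs]; omega)]
        exact List.getElem_mem _
      have hslt : (PySem.List.sorted lt (fun x => x) false).length = lt.length :=
        (PySem.List.sorted_perm _ _ _).length_eq
      have hsgt : (PySem.List.sorted gt (fun x => x) false).length = gt.length :=
        (PySem.List.sorted_perm _ _ _).length_eq
      have hxpos : 0 < xs.length := by simp [hxs]
      clear_value xs p lt eql gt
      split_ifs with h1
      · -- k < lt.length : recurse on lt
        rw [ih lt (by omega) k h1, hsplit,
          List.getD_append _ _ _ _ (by simp only [List.length_append]; omega),
          List.getD_append _ _ _ _ (by omega)]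
      · show (if k < lt.length + eql.length then p
            else pvKthGo fuel gt (k - (lt.length + eql.length))) =
          (PySem.List.sorted xs (fun x => x) false).getD k 0
        split_ifs with h2
        · -- lt.length ≤ k < lt.length + eql.length : the pivot
          rw [hsplit, List.append_assoc,
            List.getD_append_right _ _ _ _ (by omega),
            List.getD_append _ _ _ _ (by omega)]
          exact (pvAllEqGetD eql p _ (by omega) (by
            intro x hx
            simp only [heql, List.mem_filter, decide_eq_true_eq] at hx
            exact hx.2)).symm
        · -- recurse on gt
          have hk' : k - (lt.length + eql.length) < gt.length := by omega
          rw [ih gt (by omega) _ hk', hsplit,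
            List.getD_append_right _ _ _ _ (by simp only [List.length_append]; omega)]
          congr 1
          simp only [List.length_append, hslt]

theorem pvKth_sorted (xs : List Int) (k : Nat) (hk : k < xs.length) :
    pvKth xs k = (PySem.List.sorted xs (fun x => x) false).getD k 0 :=
  pvKthGo_sorted xs.length xs le_rfl k hk

theorem pvFoldCountA (P : Int → Prop) [DecidablePred P] : ∀ (l : List Int) (c : Int),
    l.foldl (fun c v => if P v then c + 1 else c) c = c + ((l.countP fun v => decide (P v)) : Int) := by
  intro l
  induction l with
  | nil => simp
  | cons a t ih =>
    intro c
    by_cases h : P a <;> simp [List.countP_cons, h, ih] <;> push_cast <;> ring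

theorem pvFoldCountB (P : Int → Prop) [DecidablePred P] : ∀ (l : List Int) (c : Int),
    l.foldl (fun c v => c + if P v then 1 else 0) c = c + ((l.countP fun v => decide (P v)) : Int) := by
  intro l
  induction l with
  | nil => simp
  | cons a t ih =>
    intro c
    by_cases h : P a <;> simp [List.countP_cons, h, ih] <;> push_cast <;> ring

theorem pvCountEq (L U : Int) (l1 l2 : List Int) (hperm : l1.Perm l2) :
    l1.foldl (fun c v => if L ≤ v ∧ v ≤ U then c + 1 else c) (0 : Int) =
    l2.foldl (fun c v => c + if L ≤ v ∧ v ≤ U then 1 else 0) (0 : Int) := by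
  rw [pvFoldCountA, pvFoldCountB, hperm.countP_eq]

theorem summarize_password_candidates_spec : Claim_equal_summarize_password_candidates := by
  intro numbers _ hpre
  unfold Spec_summarize_password_candidates
  simp only [summarize_password_candidates, summarize_password_candidates_alt]
  have hpos : 0 < numbers.length := by
    cases numbers with
    | nil => exact absurd rfl hpre
    | cons a t => simp
  set s := PySem.List.sorted numbers (fun x => x) false with hs
  have hlen : s.length = numbers.length := (PySem.List.sorted_perm _ _ _).length_eq
  have hget : ∀ m : Nat, m < s.length → (PySem.List.pyGet? s ((m : Nat) : Int)).getD 0 = s.getD m 0 := by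
    intro m hm
    rw [PySem.List.pyGet?_natCast, List.getElem?_eq_getElem hm, List.getD_eq_getElem _ _ hm]
    rfl
  have e1 : ((s.length : Int) - 1) = (((numbers.length - 1 : Nat) : Nat) : Int) := by
    rw [hlen]; omega
  have e2 : PySem.Int.floordiv (((numbers.length - 1 : Nat) : Nat) : Int) 2
      = ((((numbers.length - 1) / 2 : Nat) : Nat) : Int) := by
    exact_mod_cast PySem.Int.floordiv_natCast (numbers.length - 1) 2
  have e3 : PySem.Int.floordiv ((s.length : Int)) 2 = (((numbers.length / 2 : Nat) : Nat) : Int) := by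
    rw [hlen]
    exact_mod_cast PySem.Int.floordiv_natCast numbers.length 2
  have hlow : (PySem.List.pyGet? s (PySem.Int.floordiv ((s.length : Int) - 1) 2)).getD 0
      = pvKth numbers ((numbers.length - 1) / 2) := by
    rw [e1, e2, hget _ (by omega), pvKth_sorted numbers _ (by omega)]
  have hup : (PySem.List.pyGet? s (PySem.Int.floordiv ((s.length : Int)) 2)).getD 0
      = pvKth numbers (numbers.length / 2) := by
    rw [e3, hget _ (by omega), pvKth_sorted numbers _ (by omega)]
  rw [hlow, hup]
  simp only [Prod.mk.injEq]
  exact ⟨trivial, pvCountEq _ _ _ _ (PySem.List.sorted_perm _ _ _), trivial⟩
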